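-- pv_equiv track=rewrite | github.com/ybezginova2016/Python_tasks | turing/permutations.py | solution
-- ===== SOURCE A (Python) =====
-- def solution(n: int, m: int, games):
--
--    pairs = [(i, j) for i in range(1, n + 1) for j in range(i + 1, n + 1)]
--
--    for round in games:
--        for i, j in pairs:
--            if i in round[:n // 2] and j in round[:n // 2]:
--                return False
--            if i in round[n // 2:] and j in round[n // 2:]:
--                return False
--    return True
-- ===== SOURCE B (Python) =====
-- def solution(n, m, games):
--     h = n // 2
--     for rnd in games:
--         if len({x for x in rnd[:h] if 1 <= x <= n}) >= 2:
--             return False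
--         if len({x for x in rnd[h:] if 1 <= x <= n}) >= 2:
--             return False
--     return True
-- ===== Notes on version B (the rewrite author's own statement) =====
-- stated objective: faster
-- what changed: Instead of testing every pair (i,j) from 1..n against both halves of each round, B builds per round the set of in-range values in each half once and returns False as soon as one half holds two distinct in-range players.
import Mathlib
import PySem

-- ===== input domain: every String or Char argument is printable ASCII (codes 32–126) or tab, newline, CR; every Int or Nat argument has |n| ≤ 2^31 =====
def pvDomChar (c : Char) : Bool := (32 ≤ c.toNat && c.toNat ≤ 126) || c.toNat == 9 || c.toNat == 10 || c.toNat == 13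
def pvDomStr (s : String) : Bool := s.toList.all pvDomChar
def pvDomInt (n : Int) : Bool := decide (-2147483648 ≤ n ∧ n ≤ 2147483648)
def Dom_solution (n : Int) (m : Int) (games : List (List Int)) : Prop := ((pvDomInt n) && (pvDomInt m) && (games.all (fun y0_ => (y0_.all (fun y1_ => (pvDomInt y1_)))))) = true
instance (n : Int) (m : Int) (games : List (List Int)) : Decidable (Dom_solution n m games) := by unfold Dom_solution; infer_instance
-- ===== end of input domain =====

-- B replaces A's scan over all O(n^2) player pairs per round by one pass per round
-- collecting the set of in-range players in each half (objective: faster, asymptotic).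


-- ===== PORT A =====
-- pairs = [(i, j) for i in range(1, n + 1) for j in range(i + 1, n + 1)]
def pvPairsA (n : Int) : List (Int × Int) :=
  (PySem.List.pyRange 1 (n + 1) 1).flatMap
    (fun i => (PySem.List.pyRange (i + 1) (n + 1) 1).map (fun j => (i, j)))

-- per pair: 'if i in round[:n//2] and j in round[:n//2]: return False; if i in round[n//2:] and j in round[n//2:]: return False'
def pvACheck (n : Int) (p : Int × Int) (round : List Int) : Bool :=
  (decide (p.1 ∈ PySem.List.slice round none (some (PySem.Int.floordiv n 2))) &&
   decide (p.2 ∈ PySem.List.slice round none (some (PySem.Int.floordiv n 2)))) ||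
  (decide (p.1 ∈ PySem.List.slice round (some (PySem.Int.floordiv n 2)) none) &&
   decide (p.2 ∈ PySem.List.slice round (some (PySem.Int.floordiv n 2)) none))

def pvALoop (n : Int) (pairs : List (Int × Int)) : List (List Int) → Bool
  | [] => true
  | round :: rest => if pairs.any (fun p => pvACheck n p round) then false else pvALoop n pairs rest

def solution (n : Int) (m : Int) (games : List (List Int)) : Bool :=
  pvALoop n (pvPairsA n) games

-- ===== PORT B =====
-- len({x for x in half if 1 <= x <= n}) >= 2
def pvHalfBad (n : Int) (half : List Int) : Bool :=
  decide (2 ≤ (PySem.Set.ofList (half.filter (fun x => decide (1 ≤ x) && decide (x ≤ n)))).length)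

def pvBLoop (n : Int) (h : Int) : List (List Int) → Bool
  | [] => true
  | rnd :: rest =>
    if pvHalfBad n (PySem.List.slice rnd none (some h)) then false
    else if pvHalfBad n (PySem.List.slice rnd (some h) none) then false
    else pvBLoop n h rest

def solution_alt (n : Int) (m : Int) (games : List (List Int)) : Bool :=
  pvBLoop n (PySem.Int.floordiv n 2) games

-- ===== PRECONDITION & SPEC =====
def Spec_solution (n : Int) (m : Int) (games : List (List Int)) (out : Bool) : Prop := out = solution_alt n m games
instance (n : Int) (m : Int) (games : List (List Int)) (out : Bool) : Decidable (Spec_solution n m games out) := by unfold Spec_solution; infer_instance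

-- ===== CLAIM (what is proved, stated in full; the proofs are below) =====
def Claim_equal_solution : Prop := ∀ (n : Int) (m : Int) (games : List (List Int)), Dom_solution n m games → Spec_solution n m games (solution n m games)

-- ===== LEMMAS AND PROOFS =====

theorem pvHalfBad_iff (n : Int) (s : List Int) :
    pvHalfBad n s = true ↔ ∃ a b : Int, a ∈ s ∧ b ∈ s ∧ 1 ≤ a ∧ a ≤ n ∧ 1 ≤ b ∧ b ≤ n ∧ a ≠ b := by
  unfold pvHalfBad
  rw [decide_eq_true_iff]
  have hmem : ∀ x : Int, x ∈ PySem.Set.ofList (s.filter (fun x => decide (1 ≤ x) && decide (x ≤ n))) →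
      x ∈ s ∧ 1 ≤ x ∧ x ≤ n := by
    intro x hx
    rw [PySem.Set.mem_ofList, List.mem_filter] at hx
    simp at hx
    exact ⟨hx.1, hx.2⟩
  have hnd : (PySem.Set.ofList (s.filter (fun x => decide (1 ≤ x) && decide (x ≤ n)))).Nodup :=
    PySem.Set.nodup_ofList _
  constructor
  · intro h2
    rcases hFe : (PySem.Set.ofList (s.filter (fun x => decide (1 ≤ x) && decide (x ≤ n))) : List Int) with _ | ⟨a, _ | ⟨b, t⟩⟩
    · rw [hFe] at h2; simp at h2
    · rw [hFe] at h2; simp at h2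
    · rw [hFe] at hnd
      have ha := hmem a (by rw [hFe]; simp)
      have hb := hmem b (by rw [hFe]; simp)
      have hab : a ≠ b := by
        rintro rfl
        exact (List.nodup_cons.mp hnd).1 (by simp)
      exact ⟨a, b, ha.1, hb.1, ha.2.1, ha.2.2, hb.2.1, hb.2.2, hab⟩
  · rintro ⟨a, b, has, hbs, ha1, han, hb1, hbn, hab⟩
    have ha : a ∈ PySem.Set.ofList (s.filter (fun x => decide (1 ≤ x) && decide (x ≤ n))) := by
      rw [PySem.Set.mem_ofList, List.mem_filter]; simp [has, ha1, han]
    have hb : b ∈ PySem.Set.ofList (s.filter (fun x => decide (1 ≤ x) && decide (x ≤ n))) := by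
      rw [PySem.Set.mem_ofList, List.mem_filter]; simp [hbs, hb1, hbn]
    rcases hFe : (PySem.Set.ofList (s.filter (fun x => decide (1 ≤ x) && decide (x ≤ n))) : List Int) with _ | ⟨x, _ | ⟨y, t⟩⟩
    · rw [hFe] at ha; simp at ha
    · rw [hFe] at ha hb
      simp at ha hb
      exact absurd (ha.trans hb.symm) hab
    · simp

theorem pvACheck_any_iff (n : Int) (r : List Int) :
    (pvPairsA n).any (fun p => pvACheck n p r) = true ↔
      (pvHalfBad n (PySem.List.slice r none (some (PySem.Int.floordiv n 2))) = true ∨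
       pvHalfBad n (PySem.List.slice r (some (PySem.Int.floordiv n 2)) none) = true) := by
  rw [List.any_eq_true]
  have hmemp : ∀ p : Int × Int, p ∈ pvPairsA n ↔ 1 ≤ p.1 ∧ p.1 < p.2 ∧ p.2 ≤ n := by
    intro p
    unfold pvPairsA
    simp [List.mem_flatMap, List.mem_map, PySem.List.mem_pyRange_one]
    constructor
    · rintro ⟨i, hi, j, hj, hij⟩
      rw [← hij]; constructor; omega; constructor; omega; omega
    · intro h
      exact ⟨p.1, by omega, p.2, by omega, rfl⟩
  constructor
  · rintro ⟨p, hp, hchk⟩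
    rw [hmemp] at hp
    unfold pvACheck at hchk
    simp only [Bool.or_eq_true, Bool.and_eq_true, decide_eq_true_iff] at hchk
    rcases hchk with ⟨h1, h2⟩ | ⟨h1, h2⟩
    · exact Or.inl ((pvHalfBad_iff n _).2 ⟨p.1, p.2, h1, h2, by omega, by omega, by omega, by omega, by omega⟩)
    · exact Or.inr ((pvHalfBad_iff n _).2 ⟨p.1, p.2, h1, h2, by omega, by omega, by omega, by omega, by omega⟩)
  · intro h
    rcases h with h | h
    · obtain ⟨a, b, has, hbs, ha1, han, hb1, hbn, hab⟩ := (pvHalfBad_iff n _).1 h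
      rcases lt_or_gt_of_ne hab with hlt | hlt
      · exact ⟨(a, b), (hmemp _).2 ⟨by omega, by omega, by omega⟩, by
          unfold pvACheck; simp only [Bool.or_eq_true, Bool.and_eq_true, decide_eq_true_iff]
          exact Or.inl ⟨has, hbs⟩⟩
      · exact ⟨(b, a), (hmemp _).2 ⟨by omega, by omega, by omega⟩, by
          unfold pvACheck; simp only [Bool.or_eq_true, Bool.and_eq_true, decide_eq_true_iff]
          exact Or.inl ⟨hbs, has⟩⟩
    · obtain ⟨a, b, has, hbs, ha1, han, hb1, hbn, hab⟩ := (pvHalfBad_iff n _).1 h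
      rcases lt_or_gt_of_ne hab with hlt | hlt
      · exact ⟨(a, b), (hmemp _).2 ⟨by omega, by omega, by omega⟩, by
          unfold pvACheck; simp only [Bool.or_eq_true, Bool.and_eq_true, decide_eq_true_iff]
          exact Or.inr ⟨has, hbs⟩⟩
      · exact ⟨(b, a), (hmemp _).2 ⟨by omega, by omega, by omega⟩, by
          unfold pvACheck; simp only [Bool.or_eq_true, Bool.and_eq_true, decide_eq_true_iff]
          exact Or.inr ⟨hbs, has⟩⟩

theorem pvLoop_eq (n : Int) (games : List (List Int)) :
    pvALoop n (pvPairsA n) games = pvBLoop n (PySem.Int.floordiv n 2) games := by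
  induction games with
  | nil => rfl
  | cons r rest ih =>
    unfold pvALoop pvBLoop
    have h := pvACheck_any_iff n r
    rcases h1 : pvHalfBad n (PySem.List.slice r none (some (PySem.Int.floordiv n 2))) with _ | _
    · rcases h2 : pvHalfBad n (PySem.List.slice r (some (PySem.Int.floordiv n 2)) none) with _ | _
      · have hany : (pvPairsA n).any (fun p => pvACheck n p r) = false := by
          rcases hb : (pvPairsA n).any (fun p => pvACheck n p r) with _ | _
          · rfl
          · rcases h.1 hb with hc | hc
            · rw [h1] at hc; exact absurd hc (by simp)
            · rw [h2] at hc; exact absurd hc (by simp)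
        rw [hany]
        simpa using ih
      · have hany : (pvPairsA n).any (fun p => pvACheck n p r) = true := h.2 (Or.inr h2)
        rw [hany]
        simp
    · have hany : (pvPairsA n).any (fun p => pvACheck n p r) = true := h.2 (Or.inl h1)
      rw [hany]
      simp

-- ===== VERDICT (by name: the statement is the Claim_ definition above) =====
theorem solution_spec : Claim_equal_solution := by
  intro n m games _
  unfold Spec_solution solution solution_alt
  exact pvLoop_eq n games
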